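-- pv_equiv track=rewrite | github.com/kai3n/fastcampus | SeongPil_Lee.py | new_upper
-- ===== SOURCE A (Python) =====
-- def new_upper(string):
--     if type(string) == str:
--         pass
--     else:
--         return None
--     chars = ''
--     for char in string:
--         asci = ord(char)
--         if 96 < asci and asci < 123:
--             asci -= 32
--             chars += chr(asci)
--         elif 64 < asci and asci < 91 or asci == 32:
--             chars += chr(asci)
--         else:
--             return 'arg must be only str'
--     return chars
-- ===== SOURCE B (Python) =====
-- def new_upper(string):
--     if type(string) != str:
--         return None
--     if all(c == ' ' or 'A' <= c <= 'Z' or 'a' <= c <= 'z' for c in string):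
--         return string.upper()
--     return 'arg must be only str'
-- ===== Notes on version B (the rewrite author's own statement) =====
-- stated objective: simpler
-- what changed: Replaced A's single interleaved build-and-check loop (manual ord/chr arithmetic with an early return) by a separate one-pass validity check followed by the library str.upper(); valid inputs contain only letters and spaces, on which upper() agrees with A's manual transform.
import Mathlib
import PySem

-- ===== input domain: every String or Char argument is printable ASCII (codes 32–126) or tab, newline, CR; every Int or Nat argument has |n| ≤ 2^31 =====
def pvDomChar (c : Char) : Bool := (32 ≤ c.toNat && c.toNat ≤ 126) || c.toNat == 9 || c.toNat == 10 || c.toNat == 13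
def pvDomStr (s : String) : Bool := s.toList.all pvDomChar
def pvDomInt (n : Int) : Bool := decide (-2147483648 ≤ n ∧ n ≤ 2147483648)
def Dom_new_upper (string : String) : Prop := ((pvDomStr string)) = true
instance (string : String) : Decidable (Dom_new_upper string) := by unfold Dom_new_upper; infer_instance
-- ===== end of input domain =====

-- B separates a one-pass validity check from the library upper() transform, replacing A's interleaved build-and-check loop; simpler.


-- ===== PORT A =====
-- loop: 'chars' is the accumulated output; the else branch is Python's early 'return'
def new_upperGo : List Char → String → String
  | [], chars => chars
  | c :: rest, chars =>
    let asci := c.toNat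
    if 96 < asci ∧ asci < 123 then new_upperGo rest (chars.push (Char.ofNat (asci - 32)))
    else if (64 < asci ∧ asci < 91) ∨ asci = 32 then new_upperGo rest (chars.push c)
    else "arg must be only str"

def new_upper (string : String) : Option String := some (new_upperGo string.toList "")

-- ===== PORT B =====
def new_upper_alt (string : String) : Option String :=
  if string.toList.all (fun c => c == ' ' || ('A' ≤ c && c ≤ 'Z') || ('a' ≤ c && c ≤ 'z')) then
    some (PySem.Str.upper string)
  else some "arg must be only str"

-- ===== PRECONDITION & SPEC =====
def Spec_new_upper (string : String) (out : Option String) : Prop := out = new_upper_alt string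
instance (string : String) (out : Option String) : Decidable (Spec_new_upper string out) := by unfold Spec_new_upper; infer_instance

-- ===== CLAIM (what is proved, stated in full; the proofs are below) =====
def Claim_equal_new_upper : Prop := ∀ (string : String), Dom_new_upper string → Spec_new_upper string (new_upper string)

-- ===== LEMMAS AND PROOFS =====

theorem char_le_iff (a b : Char) : (a ≤ b) ↔ (a.toNat ≤ b.toNat) := by
  rw [Char.le_def, UInt32.le_iff_toNat_le]; rfl

theorem push_append_ofList (acc : String) (c : Char) (l : List Char) :
    acc.push c ++ String.ofList l = acc ++ String.ofList (c :: l) := by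
  apply String.toList_inj.mp; simp

theorem new_upperGo_eq (cs : List Char) (acc : String) :
    new_upperGo cs acc =
      if cs.all (fun c => c == ' ' || ('A' ≤ c && c ≤ 'Z') || ('a' ≤ c && c ≤ 'z')) then
        acc ++ String.ofList (PySem.Chars.upper cs)
      else "arg must be only str" := by
  induction cs generalizing acc with
  | nil => simp [new_upperGo, PySem.Chars.upper]
  | cons c rest ih =>
    have hA : ('A' : Char).toNat = 65 := rfl
    have hZ : ('Z' : Char).toNat = 90 := rfl
    have ha : ('a' : Char).toNat = 97 := rfl
    have hz : ('z' : Char).toNat = 122 := rfl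
    have hsp : (c == ' ') = decide (c.toNat = 32) := by
      by_cases h : c = ' '
      · subst h; rfl
      · have : ¬ c.toNat = 32 := by
          intro hn
          apply h
          have h2 := Char.ofNat_toNat c
          rw [hn] at h2
          exact h2.symm
        simp [h, this]
    simp only [new_upperGo, List.all_cons, PySem.Chars.upper, List.map_cons]
    by_cases h1 : 96 < c.toNat ∧ c.toNat < 123
    · rw [if_pos h1, ih]
      have hlow : PySem.Chars.islower c = true := by
        simp [PySem.Chars.islower, char_le_iff, ha, hz]; omega
      have hvalid : (c == ' ' || (decide ('A' ≤ c) && decide (c ≤ 'Z')) || (decide ('a' ≤ c) && decide (c ≤ 'z'))) = true := by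
        simp only [PySem.Chars.islower, Bool.and_eq_true, decide_eq_true_eq] at hlow
        simp [hlow]
      rw [hvalid, Bool.true_and]
      split_ifs with h2
      · rw [PySem.Chars.upperChar, if_pos hlow, push_append_ofList]; rfl
      · rfl
    · rw [if_neg h1]
      by_cases h2 : (64 < c.toNat ∧ c.toNat < 91) ∨ c.toNat = 32
      · rw [if_pos h2, ih]
        have hnlow : PySem.Chars.islower c = false := by
          simp [PySem.Chars.islower, char_le_iff, ha, hz]; omega
        have hvalid : (c == ' ' || (decide ('A' ≤ c) && decide (c ≤ 'Z')) || (decide ('a' ≤ c) && decide (c ≤ 'z'))) = true := by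
          simp [hsp, char_le_iff, hA, hZ, ha, hz]; omega
        rw [hvalid, Bool.true_and]
        split_ifs with h3
        · rw [PySem.Chars.upperChar, if_neg (by simp [hnlow]), push_append_ofList]; rfl
        · rfl
      · rw [if_neg h2]
        have hvalid : (c == ' ' || (decide ('A' ≤ c) && decide (c ≤ 'Z')) || (decide ('a' ≤ c) && decide (c ≤ 'z'))) = false := by
          simp [hsp, char_le_iff, hA, hZ, ha, hz]; omega
        rw [hvalid, Bool.false_and, if_neg (by simp)]

-- ===== VERDICT (by name: the statement is the Claim_ definition above) =====
theorem new_upper_spec : Claim_equal_new_upper := by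
  intro s _
  unfold Spec_new_upper new_upper new_upper_alt
  rw [new_upperGo_eq]
  split_ifs with h
  · congr 1
  · rfl
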